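-- pv_equiv track=rewrite | github.com/Jungddaseul/baekjoons | 프로그래머스/lv1/82612. 부족한 금액 계산하기/부족한 금액 계산하기.py | solution
-- ===== SOURCE A (Python) =====
-- def solution(price, money, count):
--     result = 0
--     answer = 0
--     for i in range(1, count+1):
--         answer += price*i
--
--     if answer >= money:
--         return abs(answer-money)
--     else:
--         return 0
-- ===== SOURCE B (Python) =====
-- def solution(price, money, count):
--     n = count if count > 0 else 0
--     total = price * n * (n + 1) // 2
--     return total - money if total >= money else 0
-- ===== Notes on version B (the rewrite author's own statement) =====
-- stated objective: faster
-- what changed: Replaced the O(count) summation loop by the closed-form arithmetic-series total price*n*(n+1)//2 (n = max(count,0)).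
import Mathlib
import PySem

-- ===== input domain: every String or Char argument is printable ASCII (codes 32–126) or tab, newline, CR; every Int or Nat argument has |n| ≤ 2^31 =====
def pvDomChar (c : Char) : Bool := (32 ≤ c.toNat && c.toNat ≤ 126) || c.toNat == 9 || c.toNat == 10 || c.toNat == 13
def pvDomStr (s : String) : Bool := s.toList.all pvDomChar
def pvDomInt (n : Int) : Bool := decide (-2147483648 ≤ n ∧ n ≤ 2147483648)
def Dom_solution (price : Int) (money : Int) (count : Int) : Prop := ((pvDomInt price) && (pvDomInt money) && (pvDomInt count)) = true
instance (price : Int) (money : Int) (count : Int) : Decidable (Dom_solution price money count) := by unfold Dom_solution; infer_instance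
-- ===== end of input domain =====

-- B replaces A's O(count) summation loop by the closed-form arithmetic-series total (objective: faster).

-- ===== PORT A =====
def solution (price : Int) (money : Int) (count : Int) : Int :=
  let answer : Int := (PySem.List.pyRange 1 (count + 1) 1).foldl (fun a i => a + price * i) 0
  if answer ≥ money then |answer - money| else 0

-- ===== PORT B =====
def solution_alt (price : Int) (money : Int) (count : Int) : Int :=
  let n : Int := if count > 0 then count else 0
  let total : Int := PySem.Int.floordiv (price * n * (n + 1)) 2
  if total ≥ money then total - money else 0

-- ===== PRECONDITION & SPEC =====
def Spec_solution (price : Int) (money : Int) (count : Int) (out : Int) : Prop := out = solution_alt price money count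
instance (price : Int) (money : Int) (count : Int) (out : Int) : Decidable (Spec_solution price money count out) := by unfold Spec_solution; infer_instance

-- ===== CLAIM (what is proved, stated in full; the proofs are below) =====
def Claim_equal_solution : Prop := ∀ (price : Int) (money : Int) (count : Int), Dom_solution price money count → Spec_solution price money count (solution price money count)

-- ===== LEMMAS AND PROOFS =====

-- twice the loop's sum over range m equals p * m * (m+1)
theorem pv_twice_sum (p : Int) (m : Nat) :
    2 * ((List.range m).foldl (fun (a : Int) (k : Nat) => a + p * (1 + (k : Int))) 0) = p * m * (m + 1) := by
  induction m with
  | zero => simp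
  | succ m ih =>
    rw [List.range_succ, List.foldl_append]
    simp only [List.foldl_cons, List.foldl_nil]
    push_cast
    ring_nf
    ring_nf at ih
    omega

-- the loop of A equals the closed-form total of B
theorem pv_loop_eq (p c : Int) :
    (PySem.List.pyRange 1 (c + 1) 1).foldl (fun a i => a + p * i) 0
      = PySem.Int.floordiv (p * (if c > 0 then c else 0) * ((if c > 0 then c else 0) + 1)) 2 := by
  rw [PySem.List.pyRange_one, List.foldl_map]
  set n : Int := if c > 0 then c else 0 with hn
  have hmn : (c + 1 - 1).toNat = n.toNat := by simp only [hn]; omega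
  rw [hmn]
  have h2 := pv_twice_sum p n.toNat
  have hcast : (n.toNat : Int) = n := by omega
  rw [hcast] at h2
  rw [← h2, mul_comm]
  have : PySem.Int.floordiv (((List.range n.toNat).foldl (fun (a : Int) (k : Nat) => a + p * (1 + (k : Int))) 0) * 2) 2
      = ((List.range n.toNat).foldl (fun (a : Int) (k : Nat) => a + p * (1 + (k : Int))) 0) := by
    rw [PySem.Int.floordiv_eq_ediv_of_pos (by omega)]
    exact Int.mul_ediv_cancel _ (by omega)
  exact this.symm

-- ===== VERDICT (by name: the statement is the Claim_ definition above) =====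
theorem solution_spec : Claim_equal_solution := by
  intro price money count _
  unfold Spec_solution solution solution_alt
  simp only [pv_loop_eq]
  split_ifs <;> first
    | rfl
    | (rename_i hge; exact abs_of_nonneg (by linarith))
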